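-- pv_equiv track=rewrite | github.com/Zony666/qm-LogicFunctionSimply | qm.py | cmp1d
-- ===== SOURCE A (Python) =====
-- def cmp1d(bindata1,bindata2):
--     num=0
--     nbindata=''
--     for i,data in enumerate(bindata1):
--         if bindata2[i]!=data:
--             num+=1
--             nbindata+='-'
--         else:
--             nbindata+=data
--     if num==1:
--         return nbindata
-- ===== SOURCE B (Python) =====
-- def cmp1d(bindata1, bindata2):
--     diffs = [i for i in range(len(bindata1)) if bindata2[i] != bindata1[i]]
--     if len(diffs) == 1:
--         i = diffs[0]
--         return bindata1[:i] + '-' + bindata1[i+1:]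
-- ===== Notes on version B (the rewrite author's own statement) =====
-- stated objective: simpler
-- what changed: B collects the differing indices in one comprehension and, when there is exactly one, builds the result by slicing around it, instead of A's fused pass that simultaneously counts mismatches and concatenates the merged string character by character.
import Mathlib
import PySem

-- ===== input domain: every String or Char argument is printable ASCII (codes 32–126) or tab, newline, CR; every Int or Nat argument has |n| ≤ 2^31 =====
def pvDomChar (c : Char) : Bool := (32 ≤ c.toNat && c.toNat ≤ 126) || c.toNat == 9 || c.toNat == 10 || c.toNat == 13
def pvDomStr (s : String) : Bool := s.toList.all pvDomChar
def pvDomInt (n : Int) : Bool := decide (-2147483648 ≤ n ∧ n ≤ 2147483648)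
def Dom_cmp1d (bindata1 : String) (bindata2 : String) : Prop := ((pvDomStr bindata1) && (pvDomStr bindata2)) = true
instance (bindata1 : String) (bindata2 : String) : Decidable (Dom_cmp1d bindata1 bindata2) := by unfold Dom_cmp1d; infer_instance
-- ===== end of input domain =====

-- B collects the differing indices first and slices around the unique one; simpler than A's
-- fused count-and-concatenate pass. Equivalence proved on Pre_ (A raises IndexError outside it).

-- ===== PORT A =====
-- the for-loop of A: state (num, nbindata); none = IndexError from bindata2[i]
def cmp1dLoop (bindata2 : String) : List (Int × Char) → Int → List Char → Option (Int × List Char)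
  | [], num, acc => some (num, acc)
  | (i, data) :: rest, num, acc =>
    match PySem.Str.pyGet? bindata2 i with
    | none => none
    | some c =>
      if c ≠ data then cmp1dLoop bindata2 rest (num + 1) (acc ++ ['-'])
      else cmp1dLoop bindata2 rest num (acc ++ [data])

def cmp1d (bindata1 : String) (bindata2 : String) : Option String :=
  match cmp1dLoop bindata2 (PySem.List.enumerate bindata1.toList 0) 0 [] with
  | none => none
  | some (num, nbindata) => if num = 1 then some (String.mk nbindata) else none

-- ===== PORT B =====
def cmp1d_alt (bindata1 : String) (bindata2 : String) : Option String :=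
  let l1 := bindata1.toList
  let diffs := (List.range l1.length).filter
    (fun i => PySem.Str.pyGet? bindata2 (Int.ofNat i) ≠ PySem.Str.pyGet? bindata1 (Int.ofNat i))
  match diffs with
  | [i] => some (String.mk (PySem.List.slice l1 none (some (Int.ofNat i)) ++ ['-']
             ++ PySem.List.slice l1 (some ((Int.ofNat i) + 1)) none))
  | _ => none

-- ===== PRECONDITION & SPEC =====
-- Pre_ excludes exactly the inputs where A raises IndexError (bindata2 shorter than bindata1);
-- B raises there too.
def Pre_cmp1d (bindata1 : String) (bindata2 : String) : Prop :=
  bindata1.toList.length ≤ bindata2.toList.length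
instance (bindata1 : String) (bindata2 : String) : Decidable (Pre_cmp1d bindata1 bindata2) := by
  unfold Pre_cmp1d; infer_instance
def pvWitness_cmp1d : String × String := ("100", "110")

def Spec_cmp1d (bindata1 : String) (bindata2 : String) (out : Option String) : Prop := out = cmp1d_alt bindata1 bindata2
instance (bindata1 : String) (bindata2 : String) (out : Option String) : Decidable (Spec_cmp1d bindata1 bindata2 out) := by unfold Spec_cmp1d; infer_instance

-- ===== CLAIM (what is proved, stated in full; the proofs are below) =====
def Claim_equal_cmp1d : Prop := ∀ (bindata1 : String) (bindata2 : String), Dom_cmp1d bindata1 bindata2 → Pre_cmp1d bindata1 bindata2 → Spec_cmp1d bindata1 bindata2 (cmp1d bindata1 bindata2)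

-- ===== LEMMAS AND PROOFS =====

-- number of mismatches against l2 from absolute position s
def pvCountD (l2 : List Char) : Nat → List Char → Nat
  | _, [] => 0
  | s, d :: rest => (if l2[s]? ≠ some d then 1 else 0) + pvCountD l2 (s + 1) rest

-- the merged character list A builds, from absolute position s
def pvMerge (l2 : List Char) : Nat → List Char → List Char
  | _, [] => []
  | s, d :: rest => (if l2[s]? ≠ some d then '-' else d) :: pvMerge l2 (s + 1) rest

theorem pvLoop_eq (b2 : String) (l1 : List Char) : ∀ (s : Nat) (num : Int) (acc : List Char),
    s + l1.length ≤ b2.toList.length →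
    cmp1dLoop b2 (PySem.List.enumerate l1 (s : Int)) num acc
      = some (num + (pvCountD b2.toList s l1 : Int), acc ++ pvMerge b2.toList s l1) := by
  induction l1 with
  | nil => intro s num acc _; simp [cmp1dLoop, pvCountD, pvMerge, PySem.List.enumerate]
  | cons d rest ih =>
    intro s num acc h
    have hs : s < b2.toList.length := by simp only [List.length_cons] at h; omega
    have hget : b2.toList[s]? = some (b2.toList[s]) := List.getElem?_eq_getElem hs
    have hcast : ((s : Int) + 1) = ((s + 1 : Nat) : Int) := by push_cast; ring
    rw [PySem.List.enumerate_cons]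
    simp only [cmp1dLoop, PySem.Str.pyGet?_natCast, hget, hcast]
    by_cases hd : b2.toList[s] = d
    · simp only [hd, ne_eq, not_true_eq_false, if_false]
      rw [ih (s + 1) num (acc ++ [d]) (by simp only [List.length_cons] at h; omega)]
      simp [pvCountD, pvMerge, hget, hd]
    · simp only [ne_eq, hd, not_false_eq_true, if_true]
      rw [ih (s + 1) (num + 1) (acc ++ ['-']) (by simp only [List.length_cons] at h; omega)]
      have : b2.toList[s]? ≠ some d := by rw [hget]; simp [hd]
      simp [pvCountD, pvMerge, this]
      omega

theorem pvCountD_filter (l2 : List Char) : ∀ (l1 : List Char) (s : Nat),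
    pvCountD l2 s l1
      = ((List.range l1.length).filter (fun j => decide (l2[s + j]? ≠ l1[j]?))).length := by
  intro l1
  induction l1 with
  | nil => intro s; simp [pvCountD]
  | cons d rest ih =>
    intro s
    rw [List.length_cons, List.range_succ_eq_map, List.filter_cons, List.filter_map]
    simp only [pvCountD]
    rw [ih (s + 1)]
    have hpred : ∀ j : Nat, (decide (l2[s + (j + 1)]? ≠ (d :: rest)[j + 1]?))
        = (decide (l2[(s + 1) + j]? ≠ rest[j]?)) := by
      intro j
      have : s + (j + 1) = (s + 1) + j := by omega
      simp [this]
    have hfc : (List.range rest.length).filter ((fun j => decide (l2[s + j]? ≠ (d :: rest)[j]?)) ∘ (· + 1))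
        = (List.range rest.length).filter (fun j => decide (l2[(s + 1) + j]? ≠ rest[j]?)) := by
      apply List.filter_congr
      intro j _
      simpa using hpred j
    rw [hfc]
    by_cases hd : l2[s]? = some d
    · simp [hd]
    · simp [hd]
      omega

-- if nothing differs from position s on, pvMerge is the identity
theorem pvMerge_id (l2 : List Char) : ∀ (l1 : List Char) (s : Nat),
    (∀ j, j < l1.length → l2[s + j]? = l1[j]?) → pvMerge l2 s l1 = l1 := by
  intro l1
  induction l1 with
  | nil => intro s _; simp [pvMerge]
  | cons d rest ih =>
    intro s h
    have h0 : l2[s]? = some d := by simpa using h 0 (by simp)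
    simp only [pvMerge, h0, ne_eq, not_true_eq_false, if_false]
    rw [ih (s + 1)]
    intro j hj
    have := h (j + 1) (by simp; omega)
    simpa [show s + (j + 1) = (s + 1) + j by omega] using this

theorem pvMerge_unique (l2 : List Char) : ∀ (l1 : List Char) (s i : Nat),
    i < l1.length →
    (∀ j, j < l1.length → ((l2[s + j]? ≠ l1[j]?) ↔ j = i)) →
    pvMerge l2 s l1 = l1.take i ++ ['-'] ++ l1.drop (i + 1) := by
  intro l1
  induction l1 with
  | nil => intro s i hi _; simp at hi
  | cons d rest ih =>
    intro s i hi h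
    cases i with
    | zero =>
      have h0 : l2[s]? ≠ some d := by
        have := (h 0 (by simp)).mpr rfl
        simpa using this
      simp only [pvMerge, h0, ne_eq, not_false_eq_true, if_true]
      rw [pvMerge_id l2 rest (s + 1)]
      · simp
      · intro j hj
        have := h (j + 1) (by simp; omega)
        have hne : ¬ (j + 1 = 0) := by omega
        have : ¬ (l2[s + (j + 1)]? ≠ (d :: rest)[j + 1]?) := by
          intro hc; exact hne ((this).mp hc)
        simpa [show s + (j + 1) = (s + 1) + j by omega, not_not] using this
    | succ k =>
      have h0 : l2[s]? = some d := by
        have := h 0 (by simp)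
        by_contra hc
        have : (0 : Nat) = k + 1 := this.mp (by simpa using hc)
        omega
      simp only [pvMerge, h0, ne_eq, not_true_eq_false, if_false]
      rw [ih (s + 1) k (by simp at hi; omega)]
      · simp
      · intro j hj
        have := h (j + 1) (by simp; omega)
        constructor
        · intro hc
          have : j + 1 = k + 1 := this.mp
            (by simpa [show s + (j + 1) = (s + 1) + j by omega] using hc)
          omega
        · intro hjk
          have : l2[s + (j + 1)]? ≠ (d :: rest)[j + 1]? := this.mpr (by omega)
          simpa [show s + (j + 1) = (s + 1) + j by omega] using this

-- ===== VERDICT (by name: the statement is the Claim_ definition above) =====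
theorem cmp1d_spec : Claim_equal_cmp1d := by
  intro b1 b2 _ hpre
  unfold Spec_cmp1d cmp1d cmp1d_alt Pre_cmp1d at *
  set l1 := b1.toList with hl1
  set l2 := b2.toList with hl2
  have hzero : ((0 : Nat) : Int) = (0 : Int) := by norm_num
  rw [← hzero, pvLoop_eq b2 l1 0 ((0 : Nat) : Int) [] (by simp only [← hl2]; omega)]
  -- B's filter predicate equals the absolute-index predicate used by pvCountD_filter
  have hfilter : (List.range l1.length).filter
      (fun i => PySem.Str.pyGet? b2 (Int.ofNat i) ≠ PySem.Str.pyGet? b1 (Int.ofNat i))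
      = (List.range l1.length).filter (fun j => decide (l2[0 + j]? ≠ l1[j]?)) := by
    apply List.filter_congr
    intro j _
    simp [← hl1, ← hl2, ne_comm]
  have hcount := pvCountD_filter l2 l1 0
  simp only []
  rw [hfilter]
  simp only [← hl2]
  rcases hfl : (List.range l1.length).filter (fun j => decide (l2[0 + j]? ≠ l1[j]?)) with _ | ⟨i, tl⟩
  · -- no differences: count = 0
    have : pvCountD l2 0 l1 = 0 := by rw [hcount, hfl]; simp
    simp [this]
  · rcases tl with _ | ⟨i2, tl2⟩
    · -- exactly one difference i
      have hcnt1 : pvCountD l2 0 l1 = 1 := by rw [hcount, hfl]; simp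
      have hiprop : ∀ j, j < l1.length → ((l2[0 + j]? ≠ l1[j]?) ↔ j = i) := by
        intro j hj
        constructor
        · intro hne
          have hjmem : j ∈ (List.range l1.length).filter (fun j => decide (l2[0 + j]? ≠ l1[j]?)) := by
            rw [List.mem_filter]
            exact ⟨List.mem_range.mpr hj, by simpa using hne⟩
          rw [hfl] at hjmem; simpa using hjmem
        · intro hji
          have : i ∈ (List.range l1.length).filter (fun j => decide (l2[0 + j]? ≠ l1[j]?)) := by
            rw [hfl]; simp
          rw [List.mem_filter] at this
          subst hji
          simpa using this.2
      have hilt : i < l1.length := by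
        have : i ∈ (List.range l1.length).filter (fun j => decide (l2[0 + j]? ≠ l1[j]?)) := by
          rw [hfl]; simp
        rw [List.mem_filter] at this
        exact List.mem_range.mp this.1
      have hmerge := pvMerge_unique l2 l1 0 i hilt hiprop
      have hsl1 : PySem.List.slice l1 none (some (Int.ofNat i)) = l1.take i := by
        simpa using PySem.List.slice_to_natCast l1 i
      have hsl2 : PySem.List.slice l1 (some (((i : Int)) + 1)) none = l1.drop (i + 1) := by
        have : ((i : Int) + 1) = ((i + 1 : Nat) : Int) := by push_cast; ring
        rw [this]
        simpa using PySem.List.slice_from_natCast l1 (i + 1)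
      simp [hfl, hcnt1, hmerge, hsl1, hsl2]
    · -- two or more differences
      have : pvCountD l2 0 l1 ≠ 1 := by rw [hcount, hfl]; simp
      simp only [List.nil_append]
      have hne : (0 : Int) + (pvCountD l2 0 l1 : Int) ≠ 1 := by omega
      simp [hfl]
      exact this
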